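-- pv_equiv track=rewrite | github.com/nevergoodstudy-hub/wechat-article-summarizer | src/wechat_summarizer/infrastructure/adapters/summarizers/simple.py | _extract_first_paragraphs
-- ===== SOURCE A (Python) =====
-- def _extract_first_paragraphs(paragraphs: list[str], max_length: int) -> str:
--     """提取前几段作为摘要"""
--     result: list[str] = []
--     current_length = 0
--
--     for para in paragraphs:
--         if current_length + len(para) > max_length:
--             # 如果第一段就超长，截断它
--             if not result:
--                 result.append(para[:max_length] + "...")
--             break
--         result.append(para)
--         current_length += len(para)
--
--     return "\n\n".join(result)
-- ===== SOURCE B (Python) =====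
-- def _extract_first_paragraphs(paragraphs: list[str], max_length: int) -> str:
--     """提取前几段作为摘要"""
--     cums = []
--     total = 0
--     for p in paragraphs:
--         total += len(p)
--         cums.append(total)
--     k = next((i for i, c in enumerate(cums) if c > max_length), len(paragraphs))
--     if k == 0 and paragraphs:
--         return paragraphs[0][:max_length] + "..."
--     return "\n\n".join(paragraphs[:k])
-- ===== Notes on version B (the rewrite author's own statement) =====
-- stated objective: alternative
-- what changed: Replaces A's single accumulate-and-break loop by a prefix-sum table plus a scan for the first index whose cumulative length exceeds max_length, then a slice paragraphs[:k] (or the truncated first paragraph when k == 0) joined at the end.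
import Mathlib
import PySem

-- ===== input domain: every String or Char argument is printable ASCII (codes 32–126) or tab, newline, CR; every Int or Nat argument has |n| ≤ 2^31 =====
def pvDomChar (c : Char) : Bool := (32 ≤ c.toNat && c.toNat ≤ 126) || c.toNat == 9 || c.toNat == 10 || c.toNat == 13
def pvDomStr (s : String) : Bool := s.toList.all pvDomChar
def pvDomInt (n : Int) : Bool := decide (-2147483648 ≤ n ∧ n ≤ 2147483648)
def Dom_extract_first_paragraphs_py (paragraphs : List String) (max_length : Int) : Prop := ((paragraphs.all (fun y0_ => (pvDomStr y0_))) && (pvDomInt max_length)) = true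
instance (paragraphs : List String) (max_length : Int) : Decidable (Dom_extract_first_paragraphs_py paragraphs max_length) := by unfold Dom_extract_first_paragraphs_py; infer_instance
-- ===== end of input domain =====

-- B replaces A's break-on-overflow accumulation loop by a prefix-sum table plus a
-- first-overflow index scan and a slice; objective: alternative decomposition (same cost).


-- ===== PORT A =====
-- the 'for para in paragraphs' loop with its break, carrying (current_length, result)
def pvA_loop (max_length : Int) (ps : List String) (current_length : Int) (result : List String) : List String :=
  match ps with
  | [] => result
  | para :: rest =>
    if current_length + PySem.Str.len para > max_length then
      -- break (appending the truncated first paragraph if result is empty)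
      if result = [] then result ++ [PySem.Str.slice para none (some max_length) ++ "..."] else result
    else pvA_loop max_length rest (current_length + PySem.Str.len para) (result ++ [para])

def extract_first_paragraphs_py (paragraphs : List String) (max_length : Int) : String :=
  PySem.Str.join "\n\n" (pvA_loop max_length paragraphs 0 [])

-- ===== PORT B =====
-- the prefix-sum loop building cums (running total of len(p))
def pvB_cums (total : Int) (ps : List String) : List Int :=
  match ps with
  | [] => []
  | p :: rest => (total + PySem.Str.len p) :: pvB_cums (total + PySem.Str.len p) rest

-- next((i for i, c in enumerate(cums) if c > max_length), len(cums))
def pvB_findK (cs : List Int) (max_length : Int) : Nat :=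
  match cs with
  | [] => 0
  | c :: rest => if c > max_length then 0 else pvB_findK rest max_length + 1

def extract_first_paragraphs_py_alt (paragraphs : List String) (max_length : Int) : String :=
  let cums := pvB_cums 0 paragraphs
  let k := pvB_findK cums max_length
  if k = 0 ∧ paragraphs ≠ [] then
    PySem.Str.slice (PySem.List.pyGetD paragraphs 0 "") none (some max_length) ++ "..."
  else
    PySem.Str.join "\n\n" (paragraphs.take k)   -- paragraphs[:k], k ≥ 0

-- ===== PRECONDITION & SPEC =====
def Spec_extract_first_paragraphs_py (paragraphs : List String) (max_length : Int) (out : String) : Prop := out = extract_first_paragraphs_py_alt paragraphs max_length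
instance (paragraphs : List String) (max_length : Int) (out : String) : Decidable (Spec_extract_first_paragraphs_py paragraphs max_length out) := by unfold Spec_extract_first_paragraphs_py; infer_instance

-- ===== CLAIM (what is proved, stated in full; the proofs are below) =====
def Claim_equal_extract_first_paragraphs_py : Prop := ∀ (paragraphs : List String) (max_length : Int), Dom_extract_first_paragraphs_py paragraphs max_length → Spec_extract_first_paragraphs_py paragraphs max_length (extract_first_paragraphs_py paragraphs max_length)

-- ===== LEMMAS AND PROOFS =====

-- A's loop with a non-empty accumulator extends it by exactly the take-until-overflow
-- prefix, whose length B computes as pvB_findK of the prefix sums started at the same total.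
theorem pvA_loop_eq_take (max_length : Int) (ps : List String) :
    ∀ (c : Int) (res : List String), res ≠ [] →
      pvA_loop max_length ps c res = res ++ ps.take (pvB_findK (pvB_cums c ps) max_length) := by
  induction ps with
  | nil => intro c res _; simp [pvA_loop, pvB_cums, pvB_findK]
  | cons p rest ih =>
    intro c res hres
    by_cases h : max_length < c + (p.length : Int)
    · simp [pvA_loop, pvB_cums, pvB_findK, hres, h]
    · have key := ih (c + PySem.Str.len p) (res ++ [p]) (by simp)
      simp only [pvA_loop, pvB_cums, pvB_findK]
      rw [if_neg (by simpa using h), if_neg (by simpa using h), key, List.append_assoc]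
      simp [List.take_succ_cons]

theorem extract_first_paragraphs_py_eq (paragraphs : List String) (max_length : Int) :
    extract_first_paragraphs_py paragraphs max_length = extract_first_paragraphs_py_alt paragraphs max_length := by
  cases paragraphs with
  | nil => simp [extract_first_paragraphs_py, extract_first_paragraphs_py_alt, pvA_loop, pvB_cums, pvB_findK]
  | cons p rest =>
    by_cases h : max_length < (p.length : Int)
    · have h0 : pvB_findK (pvB_cums 0 (p :: rest)) max_length = 0 := by
        simp [pvB_cums, pvB_findK, h]
      simp [extract_first_paragraphs_py, extract_first_paragraphs_py_alt, pvA_loop, h, h0,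
        PySem.List.pyGetD_zero_cons, PySem.Str.join, PySem.Str.slice]
    · have hstep : pvB_findK (pvB_cums 0 (p :: rest)) max_length
          = pvB_findK (pvB_cums (0 + PySem.Str.len p) rest) max_length + 1 := by
        simp [pvB_cums, pvB_findK, h]
      have hloop := pvA_loop_eq_take max_length rest (0 + PySem.Str.len p) [p] (by simp)
      simp only [PySem.Str.len_eq, zero_add, String.length_toList] at hstep hloop
      simp [extract_first_paragraphs_py, extract_first_paragraphs_py_alt, pvA_loop, h, hstep, hloop,
        List.take_succ_cons]

-- ===== VERDICT (by name: the statement is the Claim_ definition above) =====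
theorem extract_first_paragraphs_py_spec : Claim_equal_extract_first_paragraphs_py := by
  intro paragraphs max_length _
  exact extract_first_paragraphs_py_eq paragraphs max_length
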